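-- pv_equiv track=rewrite | github.com/Alumet/Codingame | Medium/Calcul_Maya.py | puiss
-- ===== SOURCE A (Python) =====
-- def puiss(n):
--     i=0
--     p=20**1
--     while p<=n:
--         i+=1
--         p=20**i
--     if i>0:
--         return i-1
--     else:
--         return i
-- ===== SOURCE B (Python) =====
-- def puiss(n):
--     if n < 20:
--         return 0
--     return 1 + puiss(n // 20)
-- ===== Notes on version B (the rewrite author's own statement) =====
-- stated objective: simpler
-- what changed: Replaced the upward scan over exponents, which recomputes the power each iteration and then subtracts one from the counter, by a direct recursion on the quotient of n by the base; the power loop and the final off-by-one correction disappear.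
import Mathlib
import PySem

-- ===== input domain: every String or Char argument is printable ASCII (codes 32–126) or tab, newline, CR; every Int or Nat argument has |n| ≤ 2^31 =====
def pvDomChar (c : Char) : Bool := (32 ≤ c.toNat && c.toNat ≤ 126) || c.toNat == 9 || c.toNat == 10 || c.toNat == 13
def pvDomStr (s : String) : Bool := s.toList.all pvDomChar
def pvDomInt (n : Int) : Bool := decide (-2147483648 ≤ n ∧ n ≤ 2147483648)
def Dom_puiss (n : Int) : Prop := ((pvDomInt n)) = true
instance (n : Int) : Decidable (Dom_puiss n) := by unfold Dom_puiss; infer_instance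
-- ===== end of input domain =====

-- B replaces A's upward scan over exponents (recomputing 20**i each step, plus an i>0
-- off-by-one correction) by a direct recursion on n // 20; objective: simpler.

-- ===== PORT A =====
-- A's while loop 'while p<=n: i+=1; p=20**i' as structural recursion over the same
-- state (i, p); the fuel argument only makes the recursion total (it is never exhausted
-- on any input, proved below) and guards no algorithm switch.
def puissLoop (n : Int) : Nat → Int → Int → Int
  | 0, i, _ => i
  | fuel + 1, i, p => if p ≤ n then puissLoop n fuel (i + 1) ((20 : Int) ^ (i + 1).toNat) else i

def puiss (n : Int) : Int :=
  let i := puissLoop n (n.toNat + 2) 0 ((20 : Int) ^ (1 : Nat))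
  if i > 0 then i - 1 else i

-- ===== PORT B =====
def puiss_alt (n : Int) : Int :=
  if n < 20 then 0 else 1 + puiss_alt (PySem.Int.floordiv n 20)
termination_by n.toNat
decreasing_by
  rename_i h
  have hnn : n = ((n.toNat : Nat) : Int) := by omega
  have hfd : PySem.Int.floordiv n 20 = ((n.toNat / 20 : Nat) : Int) := by
    rw [hnn]; exact_mod_cast PySem.Int.floordiv_natCast n.toNat 20
  rw [hfd]
  simp only [Int.toNat_natCast]
  omega

-- ===== PRECONDITION & SPEC =====
def Spec_puiss (n : Int) (out : Int) : Prop := out = puiss_alt n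
instance (n : Int) (out : Int) : Decidable (Spec_puiss n out) := by unfold Spec_puiss; infer_instance

-- ===== CLAIM (what is proved, stated in full; the proofs are below) =====
def Claim_equal_puiss : Prop := ∀ (n : Int), Dom_puiss n → Spec_puiss n (puiss n)

-- ===== LEMMAS AND PROOFS =====

lemma puissLoop_zero (n i p : Int) : puissLoop n 0 i p = i := rfl

lemma puissLoop_succ (n : Int) (f : Nat) (i p : Int) :
    puissLoop n (f + 1) i p = if p ≤ n then puissLoop n f (i + 1) ((20 : Int) ^ (i + 1).toNat) else i := rfl

-- the common closed form: 0 below 20, else the largest i with 20^i ≤ n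
def logSpec (n : Int) : Int := if n < 20 then 0 else (Nat.log 20 n.toNat : Int)

lemma loop_spec (n : Int) : ∀ (fuel i : Nat), 1 ≤ i → n < (20 : Int) ^ (i + fuel) →
    puissLoop n fuel (i : Int) ((20 : Int) ^ i) =
      if (20 : Int) ^ i ≤ n then ((Nat.log 20 n.toNat : Nat) + 1 : Int) else (i : Int) := by
  intro fuel
  induction fuel with
  | zero =>
    intro i hi hlt
    rw [puissLoop_zero, if_neg (by simpa using not_le.mpr hlt)]
  | succ f ih =>
    intro i hi hlt
    rw [puissLoop_succ]
    by_cases hle : (20 : Int) ^ i ≤ n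
    · rw [if_pos hle, if_pos hle]
      have hcast : ((i : Int) + 1).toNat = i + 1 := by omega
      have hstep : ((i : Int) + 1) = ((i + 1 : Nat) : Int) := by push_cast; ring
      rw [hcast, hstep]
      rw [ih (i + 1) (by omega) (by simpa [Nat.add_assoc, Nat.add_comm, Nat.add_left_comm] using hlt)]
      by_cases hle2 : (20 : Int) ^ (i + 1) ≤ n
      · rw [if_pos hle2]
      · rw [if_neg hle2]
        -- here 20^i ≤ n < 20^(i+1), so log 20 n = i
        have hn0 : (0 : Int) ≤ n := le_trans (by positivity) hle
        have hnn : n = (n.toNat : Int) := by omega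
        have hlo : 20 ^ i ≤ n.toNat := by
          have := hle; rw [hnn] at this; exact_mod_cast this
        have hhi : n.toNat < 20 ^ (i + 1) := by
          have := not_le.mp hle2; rw [hnn] at this; exact_mod_cast this
        have : Nat.log 20 n.toNat = i := Nat.log_eq_of_pow_le_of_lt_pow hlo hhi
        rw [this]
        push_cast; ring
    · rw [if_neg hle, if_neg hle]

lemma puiss_eq_logSpec (n : Int) : puiss n = logSpec n := by
  by_cases h : n < 20
  · -- loop never runs
    have hloop : puissLoop n (n.toNat + 2) 0 ((20 : Int) ^ (1 : Nat)) = 0 := by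
      show puissLoop n ((n.toNat + 1) + 1) 0 ((20 : Int) ^ (1 : Nat)) = 0
      rw [puissLoop_succ, if_neg (by push_cast; omega)]
    simp only [puiss, hloop, logSpec, if_pos h]
    norm_num
  · -- n ≥ 20: one unfolding, then loop_spec at i = 1
    have hn0 : (0 : Int) ≤ n := by omega
    have hnn : n = (n.toNat : Int) := by omega
    have hfuel : n < (20 : Int) ^ (1 + (n.toNat + 1)) := by
      have h1 : n.toNat < 20 ^ n.toNat := Nat.lt_pow_self (by norm_num)
      have h2 : (20:Nat) ^ n.toNat ≤ 20 ^ (1 + (n.toNat + 1)) :=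
        Nat.pow_le_pow_right (by norm_num) (by omega)
      rw [hnn]; exact_mod_cast lt_of_lt_of_le h1 h2
    have hle : (20 : Int) ^ (1 : Nat) ≤ n := by push_cast; omega
    have hloop : puissLoop n (n.toNat + 2) 0 ((20 : Int) ^ (1 : Nat)) =
        ((Nat.log 20 n.toNat : Nat) + 1 : Int) := by
      show puissLoop n ((n.toNat + 1) + 1) 0 ((20 : Int) ^ (1 : Nat)) = _
      rw [puissLoop_succ, if_pos hle]
      have h01 : ((0 : Int) + 1).toNat = (1 : Nat) := by decide
      have h01' : ((0 : Int) + 1) = ((1 : Nat) : Int) := by decide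
      rw [h01, h01']
      rw [loop_spec n (n.toNat + 1) 1 (le_refl 1) hfuel, if_pos hle]
    simp only [puiss, hloop, logSpec, if_neg h]
    rw [if_pos (by positivity : ((Nat.log 20 n.toNat : Int) + 1) > 0)]
    ring

lemma alt_eq_logSpec_aux : ∀ (m : Nat) (n : Int), n.toNat ≤ m → puiss_alt n = logSpec n := by
  intro m
  induction m with
  | zero =>
    intro n hn
    have h : n < 20 := by omega
    rw [puiss_alt, if_pos h, logSpec, if_pos h]
  | succ m ih =>
    intro n hn
    by_cases h : n < 20
    · rw [puiss_alt, if_pos h, logSpec, if_pos h]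
    · have hm20 : 20 ≤ n.toNat := by omega
      have hnn : n = ((n.toNat : Nat) : Int) := by omega
      have hfd : PySem.Int.floordiv n 20 = ((n.toNat / 20 : Nat) : Int) := by
        rw [hnn]; exact_mod_cast PySem.Int.floordiv_natCast n.toNat 20
      have hrec : puiss_alt (PySem.Int.floordiv n 20) = logSpec (PySem.Int.floordiv n 20) := by
        apply ih
        rw [hfd]
        simp only [Int.toNat_natCast]
        omega
      rw [puiss_alt, if_neg h, hrec]
      have hlog : Nat.log 20 (n.toNat / 20) = Nat.log 20 n.toNat - 1 := Nat.log_div_base 20 n.toNat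
      have hpos : 0 < Nat.log 20 n.toNat := Nat.log_pos (by norm_num) hm20
      rw [hfd, logSpec, logSpec, if_neg h]
      simp only [Int.toNat_natCast]
      by_cases hsm : n.toNat / 20 < 20
      · rw [if_pos (by exact_mod_cast hsm : ((n.toNat / 20 : Nat) : Int) < 20)]
        have h0 : Nat.log 20 (n.toNat / 20) = 0 := by
          rw [Nat.log_eq_zero_iff]; left; exact hsm
        have h1 : Nat.log 20 n.toNat = 1 := by omega
        rw [h1]; norm_num
      · rw [if_neg (by exact_mod_cast hsm : ¬ ((n.toNat / 20 : Nat) : Int) < 20)]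
        rw [hlog]
        push_cast [Nat.cast_sub (by omega : 1 ≤ Nat.log 20 n.toNat)]; ring

lemma alt_eq_logSpec (n : Int) : puiss_alt n = logSpec n :=
  alt_eq_logSpec_aux n.toNat n (le_refl _)

-- ===== VERDICT (by name: the statement is the Claim_ definition above) =====
theorem puiss_spec : Claim_equal_puiss := by
  intro n _
  unfold Spec_puiss
  rw [puiss_eq_logSpec, alt_eq_logSpec]
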